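-- pv_equiv track=rewrite | github.com/hs634/algorithms | python/company/zenefits.py | maxThreats
-- ===== SOURCE A (Python) =====
-- def maxThreats( a):
--     if a is None or len(a) <= 1:
--         return 0
--     g_max = 0
--     for i in range(len(a)):
--         cur_max = 0
--         j = a[i] - 1
--         cur_max = get_threats(i, j, a)
--         g_max = max(cur_max, g_max)
--
--     return g_max
--
-- def get_threats(row, col, a):
--     ct = 0
--     i = row - 1
--     while i >= 0 and (row-i != col-a[i]+1):
--         i -= 1
--     if i >= 0:
--         ct += 1
--
--     i = row + 1
--     while i < len(a) and (i-row != a[i]-col-1):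
--         i += 1
--     if i < len(a):
--         ct += 1
--
--     i = row - 1
--     while i >= 0 and (row-i != a[i]-col-1):
--         i -= 1
--     if i >= 0:
--         ct += 1
--
--     i = row + 1
--     while i < len(a) and (i-row != col-a[i]+1):
--         i += 1
--     if i < len(a):
--         ct += 1
--
--     return ct
-- ===== SOURCE B (Python) =====
-- def maxThreats(a):
--     if a is None or len(a) <= 1:
--         return 0
--     n = len(a)
--     # forward pass: for each row, count threats from smaller rows via seen diagonal keys
--     up = [0] * n
--     seen_d = set()
--     seen_s = set()
--     for i in range(n):
--         d = i - a[i]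
--         s = i + a[i]
--         up[i] = (d in seen_d) + (s in seen_s)
--         seen_d.add(d)
--         seen_s.add(s)
--     # backward pass: add threats from larger rows, track the maximum
--     g = 0
--     seen_d = set()
--     seen_s = set()
--     for i in reversed(range(n)):
--         d = i - a[i]
--         s = i + a[i]
--         ct = up[i] + (d in seen_d) + (s in seen_s)
--         if ct > g:
--             g = ct
--         seen_d.add(d)
--         seen_s.add(s)
--     return g
-- ===== Notes on version B (the rewrite author's own statement) =====
-- stated objective: faster
-- what changed: A scans the whole column range with four while-loops per queen (O(n^2)); B makes one forward and one backward pass keeping hash sets of the diagonal keys i-a[i] and i+a[i], so each queen's four neighbour-existence tests become O(1) set lookups (O(n) total).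
import Mathlib
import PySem

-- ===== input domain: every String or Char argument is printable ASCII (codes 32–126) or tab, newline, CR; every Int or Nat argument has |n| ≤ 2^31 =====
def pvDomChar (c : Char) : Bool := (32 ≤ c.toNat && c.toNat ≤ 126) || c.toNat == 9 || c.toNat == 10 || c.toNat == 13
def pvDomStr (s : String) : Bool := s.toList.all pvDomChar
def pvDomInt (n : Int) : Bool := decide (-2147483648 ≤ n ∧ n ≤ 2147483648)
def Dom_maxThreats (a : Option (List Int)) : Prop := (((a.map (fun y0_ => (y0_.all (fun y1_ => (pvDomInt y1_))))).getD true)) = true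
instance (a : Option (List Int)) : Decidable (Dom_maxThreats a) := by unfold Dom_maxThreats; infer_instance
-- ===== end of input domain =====

-- B replaces A's four linear scans per queen (O(n^2)) by two linear passes with hash sets
-- of the diagonal keys i - a[i] and i + a[i] (O(n)); objective: faster (asymptotic).

-- ===== PORT A =====
-- each of A's four 'while' loops scans until the stop condition c holds or the index leaves the board;
-- scanDown walks i, i-1, …; scanUp walks i, i+1, … .  a[i] is only read with 0 ≤ i < len(a), so pyGetD is exact.
def scanDown (c : Int → Bool) (i : Int) : Int :=
  if h : 0 ≤ i ∧ ¬ c i then scanDown c (i - 1) else i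
termination_by (i + 1).toNat
decreasing_by omega

def scanUp (len : Int) (c : Int → Bool) (i : Int) : Int :=
  if h : i < len ∧ ¬ c i then scanUp len c (i + 1) else i
termination_by (len - i).toNat
decreasing_by omega

def getThreats (row col : Int) (a : List Int) : Int :=
  let ct : Int := 0
  let i := scanDown (fun i => decide (row - i = col - PySem.List.pyGetD a i 0 + 1)) (row - 1)
  let ct := if 0 ≤ i then ct + 1 else ct
  let i := scanUp (a.length : Int) (fun i => decide (i - row = PySem.List.pyGetD a i 0 - col - 1)) (row + 1)
  let ct := if i < (a.length : Int) then ct + 1 else ct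
  let i := scanDown (fun i => decide (row - i = PySem.List.pyGetD a i 0 - col - 1)) (row - 1)
  let ct := if 0 ≤ i then ct + 1 else ct
  let i := scanUp (a.length : Int) (fun i => decide (i - row = col - PySem.List.pyGetD a i 0 + 1)) (row + 1)
  let ct := if i < (a.length : Int) then ct + 1 else ct
  ct

def maxThreats (a : Option (List Int)) : Int :=
  match a with
  | none => 0
  | some l =>
    if l.length ≤ 1 then 0
    else
      (List.range l.length).foldl (fun g_max (i : Nat) =>
        let j := PySem.List.pyGetD l (i : Int) 0 - 1
        let cur_max := getThreats (i : Int) j l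
        max cur_max g_max) 0

-- ===== PORT B =====
-- forward-pass loop body: up[i] := threats from smaller rows; record the diagonal keys
def fstep (l : List Int) (st : List Int × PySem.Set Int × PySem.Set Int) (i : Nat) :
    List Int × PySem.Set Int × PySem.Set Int :=
  let (up, sd, ss) := st
  let d : Int := (i : Int) - PySem.List.pyGetD l (i : Int) 0
  let s : Int := (i : Int) + PySem.List.pyGetD l (i : Int) 0
  let up := PySem.List.pySetD up (i : Int)
    ((if PySem.Set.contains sd d then (1 : Int) else 0) + (if PySem.Set.contains ss s then 1 else 0))
  (up, PySem.Set.add sd d, PySem.Set.add ss s)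

-- backward-pass loop body: add threats from larger rows, keep the running maximum
def bstep (l up : List Int) (st : Int × PySem.Set Int × PySem.Set Int) (i : Nat) :
    Int × PySem.Set Int × PySem.Set Int :=
  let (g, sd, ss) := st
  let d : Int := (i : Int) - PySem.List.pyGetD l (i : Int) 0
  let s : Int := (i : Int) + PySem.List.pyGetD l (i : Int) 0
  let ct := PySem.List.pyGetD up (i : Int) 0
    + (if PySem.Set.contains sd d then (1 : Int) else 0) + (if PySem.Set.contains ss s then 1 else 0)
  let g := if ct > g then ct else g
  (g, PySem.Set.add sd d, PySem.Set.add ss s)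

def maxThreats_alt (a : Option (List Int)) : Int :=
  match a with
  | none => 0
  | some l =>
    if l.length ≤ 1 then 0
    else
      let n := l.length
      let fwd := (List.range n).foldl (fstep l) (List.replicate n 0, PySem.Set.empty, PySem.Set.empty)
      let bwd := ((List.range n).reverse).foldl (bstep l fwd.1) (0, PySem.Set.empty, PySem.Set.empty)
      bwd.1

-- ===== PRECONDITION & SPEC =====
def Spec_maxThreats (a : Option (List Int)) (out : Int) : Prop := out = maxThreats_alt a
instance (a : Option (List Int)) (out : Int) : Decidable (Spec_maxThreats a out) := by unfold Spec_maxThreats; infer_instance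

-- ===== CLAIM (what is proved, stated in full; the proofs are below) =====
def Claim_equal_maxThreats : Prop := ∀ (a : Option (List Int)), Dom_maxThreats a → Spec_maxThreats a (maxThreats a)

-- ===== LEMMAS AND PROOFS =====

-- diagonal keys of row j
def dk (l : List Int) (j : Nat) : Int := (j : Int) - l.getD j 0
def sk (l : List Int) (j : Nat) : Int := (j : Int) + l.getD j 0

-- threats on row i from smaller rows / larger rows, and their sum
def cntUp (l : List Int) (i : Nat) : Int :=
  (if ∃ j, j < i ∧ dk l j = dk l i then (1 : Int) else 0)
    + (if ∃ j, j < i ∧ sk l j = sk l i then 1 else 0)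
def cntDn (l : List Int) (i : Nat) : Int :=
  (if ∃ j, j < l.length ∧ i < j ∧ dk l j = dk l i then (1 : Int) else 0)
    + (if ∃ j, j < l.length ∧ i < j ∧ sk l j = sk l i then 1 else 0)
def cnt (l : List Int) (i : Nat) : Int := cntUp l i + cntDn l i

theorem scanDown_spec (c : Int → Bool) :
    ∀ s : Int, (0 ≤ scanDown c s) ↔ ∃ j : Nat, (j : Int) ≤ s ∧ c j := by
  have key : ∀ (fuel : Nat) (s : Int), (s + 1).toNat ≤ fuel →
      ((0 ≤ scanDown c s) ↔ ∃ j : Nat, (j : Int) ≤ s ∧ c j) := by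
    intro fuel
    induction fuel with
    | zero =>
      intro s hs
      have hneg : ¬ (0 ≤ s) := by omega
      rw [scanDown, dif_neg (by tauto)]
      constructor
      · intro h; omega
      · rintro ⟨j, hj, -⟩; exfalso; omega
    | succ fuel ih =>
      intro s hs
      by_cases h0 : 0 ≤ s
      · by_cases hc : c s = true
        · rw [scanDown, dif_neg (by simp [hc])]
          constructor
          · intro _
            exact ⟨s.toNat, by omega, by rwa [Int.toNat_of_nonneg h0]⟩
          · intro _; exact h0
        · rw [scanDown, dif_pos ⟨h0, by simp [hc]⟩]
          rw [ih (s - 1) (by omega)]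
          constructor
          · rintro ⟨j, hj, hcj⟩; exact ⟨j, by omega, hcj⟩
          · rintro ⟨j, hj, hcj⟩
            by_cases hje : (j : Int) = s
            · exfalso; rw [hje] at hcj; exact hc hcj
            · exact ⟨j, by omega, hcj⟩
      · rw [scanDown, dif_neg (by tauto)]
        constructor
        · intro h; omega
        · rintro ⟨j, hj, -⟩; exfalso; omega
  intro s
  exact key (s + 1).toNat s le_rfl

theorem scanUp_spec (len : Int) (c : Int → Bool) :
    ∀ s : Int, 0 ≤ s → ((scanUp len c s < len) ↔ ∃ j : Nat, s ≤ (j : Int) ∧ (j : Int) < len ∧ c j) := by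
  have key : ∀ (fuel : Nat) (s : Int), 0 ≤ s → (len - s).toNat ≤ fuel →
      ((scanUp len c s < len) ↔ ∃ j : Nat, s ≤ (j : Int) ∧ (j : Int) < len ∧ c j) := by
    intro fuel
    induction fuel with
    | zero =>
      intro s hs0 hs
      have hneg : ¬ (s < len) := by omega
      rw [scanUp, dif_neg (by tauto)]
      constructor
      · intro h; omega
      · rintro ⟨j, hj1, hj2, -⟩; exfalso; omega
    | succ fuel ih =>
      intro s hs0 hs
      by_cases h0 : s < len
      · by_cases hc : c s = true
        · rw [scanUp, dif_neg (by simp [hc])]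
          constructor
          · intro _
            exact ⟨s.toNat, by omega, by rw [Int.toNat_of_nonneg hs0]; exact h0,
                by rwa [Int.toNat_of_nonneg hs0]⟩
          · intro _; exact h0
        · rw [scanUp, dif_pos ⟨h0, by simp [hc]⟩]
          rw [ih (s + 1) (by omega) (by omega)]
          constructor
          · rintro ⟨j, hj1, hj2, hcj⟩; exact ⟨j, by omega, hj2, hcj⟩
          · rintro ⟨j, hj1, hj2, hcj⟩
            by_cases hje : (j : Int) = s
            · exfalso; rw [hje] at hcj; exact hc hcj
            · exact ⟨j, by omega, hj2, hcj⟩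
      · rw [scanUp, dif_neg (by tauto)]
        constructor
        · intro h; omega
        · rintro ⟨j, hj1, hj2, -⟩; exfalso; omega
  intro s hs0
  exact key (len - s).toNat s hs0 le_rfl

theorem ite_acc (P : Prop) [Decidable P] (x : Int) :
    (if P then x + 1 else x) = x + (if P then 1 else 0) := by
  split_ifs <;> omega

theorem getThreats_eq_cnt (l : List Int) (i : Nat) :
    getThreats (i : Int) (PySem.List.pyGetD l (i : Int) 0 - 1) l = cnt l i := by
  have e1 : (0 ≤ scanDown
      (fun i2 => decide ((i : Int) - i2 = (PySem.List.pyGetD l (i : Int) 0 - 1) - PySem.List.pyGetD l i2 0 + 1)) ((i : Int) - 1))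
      ↔ (∃ j, j < i ∧ dk l j = dk l i) := by
    rw [scanDown_spec]
    constructor
    · rintro ⟨j, hj, hcj⟩
      simp only [PySem.List.pyGetD_natCast, decide_eq_true_eq] at hcj
      exact ⟨j, by omega, by unfold dk; omega⟩
    · rintro ⟨j, hj, hcj⟩
      refine ⟨j, by omega, ?_⟩
      simp only [PySem.List.pyGetD_natCast, decide_eq_true_eq]
      unfold dk at hcj; omega
  have e2 : (scanUp (l.length : Int)
      (fun i2 => decide (i2 - (i : Int) = PySem.List.pyGetD l i2 0 - (PySem.List.pyGetD l (i : Int) 0 - 1) - 1)) ((i : Int) + 1)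
      < (l.length : Int))
      ↔ (∃ j, j < l.length ∧ i < j ∧ dk l j = dk l i) := by
    rw [scanUp_spec _ _ _ (by omega)]
    constructor
    · rintro ⟨j, hj1, hj2, hcj⟩
      simp only [PySem.List.pyGetD_natCast, decide_eq_true_eq] at hcj
      exact ⟨j, by omega, by omega, by unfold dk; omega⟩
    · rintro ⟨j, hj1, hj2, hcj⟩
      refine ⟨j, by omega, by omega, ?_⟩
      simp only [PySem.List.pyGetD_natCast, decide_eq_true_eq]
      unfold dk at hcj; omega
  have e3 : (0 ≤ scanDown
      (fun i2 => decide ((i : Int) - i2 = PySem.List.pyGetD l i2 0 - (PySem.List.pyGetD l (i : Int) 0 - 1) - 1)) ((i : Int) - 1))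
      ↔ (∃ j, j < i ∧ sk l j = sk l i) := by
    rw [scanDown_spec]
    constructor
    · rintro ⟨j, hj, hcj⟩
      simp only [PySem.List.pyGetD_natCast, decide_eq_true_eq] at hcj
      exact ⟨j, by omega, by unfold sk; omega⟩
    · rintro ⟨j, hj, hcj⟩
      refine ⟨j, by omega, ?_⟩
      simp only [PySem.List.pyGetD_natCast, decide_eq_true_eq]
      unfold sk at hcj; omega
  have e4 : (scanUp (l.length : Int)
      (fun i2 => decide (i2 - (i : Int) = (PySem.List.pyGetD l (i : Int) 0 - 1) - PySem.List.pyGetD l i2 0 + 1)) ((i : Int) + 1)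
      < (l.length : Int))
      ↔ (∃ j, j < l.length ∧ i < j ∧ sk l j = sk l i) := by
    rw [scanUp_spec _ _ _ (by omega)]
    constructor
    · rintro ⟨j, hj1, hj2, hcj⟩
      simp only [PySem.List.pyGetD_natCast, decide_eq_true_eq] at hcj
      exact ⟨j, by omega, by omega, by unfold sk; omega⟩
    · rintro ⟨j, hj1, hj2, hcj⟩
      refine ⟨j, by omega, by omega, ?_⟩
      simp only [PySem.List.pyGetD_natCast, decide_eq_true_eq]
      unfold sk at hcj; omega
  unfold getThreats
  simp only [ite_acc]
  simp only [e1, e2, e3, e4]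
  unfold cnt cntUp cntDn
  ring

theorem maxThreats_eq_ref (l : List Int) :
    (List.range l.length).foldl (fun g_max (i : Nat) =>
        let j := PySem.List.pyGetD l (i : Int) 0 - 1
        let cur_max := getThreats (i : Int) j l
        max cur_max g_max) 0
      = (List.range l.length).foldl (fun g i => max (cnt l i) g) 0 := by
  have hfun : (fun (g_max : Int) (i : Nat) =>
      let j := PySem.List.pyGetD l (i : Int) 0 - 1
      let cur_max := getThreats (i : Int) j l
      max cur_max g_max) = fun g i => max (cnt l i) g := by
    funext g i
    simp only [getThreats_eq_cnt l i]
  rw [hfun]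

theorem fwd_inv' (l : List Int) :
    ∀ m, m ≤ l.length →
      (((List.range m).foldl (fstep l) (List.replicate l.length 0, PySem.Set.empty, PySem.Set.empty)).1.length = l.length)
      ∧ (∀ i, i < l.length → ((List.range m).foldl (fstep l) (List.replicate l.length 0, PySem.Set.empty, PySem.Set.empty)).1.getD i 0 = if i < m then cntUp l i else 0)
      ∧ (∀ x, x ∈ ((List.range m).foldl (fstep l) (List.replicate l.length 0, PySem.Set.empty, PySem.Set.empty)).2.1 ↔ ∃ j, j < m ∧ dk l j = x)
      ∧ (∀ x, x ∈ ((List.range m).foldl (fstep l) (List.replicate l.length 0, PySem.Set.empty, PySem.Set.empty)).2.2 ↔ ∃ j, j < m ∧ sk l j = x) := by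
  intro m
  induction m with
  | zero =>
    intro _
    refine ⟨by simp, ?_, ?_, ?_⟩
    · intro i hi
      simp [List.getD_eq_getElem?_getD, hi]
    · intro x; simp [PySem.Set.empty]
    · intro x; simp [PySem.Set.empty]
  | succ m ih =>
    intro hm
    obtain ⟨h1, h2, h3, h4⟩ := ih (Nat.le_of_succ_le hm)
    rw [List.range_succ, List.foldl_append, List.foldl_cons, List.foldl_nil]
    rcases hst : (List.range m).foldl (fstep l) (List.replicate l.length 0, PySem.Set.empty, PySem.Set.empty) with ⟨up, sd, ss⟩
    rw [hst] at h1 h2 h3 h4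
    dsimp only at h1 h2 h3 h4
    simp only [fstep]
    have hd : (m : Int) - PySem.List.pyGetD l (m : Int) 0 = dk l m := by
      simp [dk, PySem.List.pyGetD_natCast]
    have hsx : (m : Int) + PySem.List.pyGetD l (m : Int) 0 = sk l m := by
      simp [sk, PySem.List.pyGetD_natCast]
    rw [hd, hsx]
    have hv1 : (PySem.Set.contains sd (dk l m) = true) ↔ (∃ j, j < m ∧ dk l j = dk l m) := by
      rw [PySem.Set.contains_iff]; exact h3 _
    have hv2 : (PySem.Set.contains ss (sk l m) = true) ↔ (∃ j, j < m ∧ sk l j = sk l m) := by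
      rw [PySem.Set.contains_iff]; exact h4 _
    have hmu : m < up.length := by omega
    refine ⟨?_, ?_, ?_, ?_⟩
    · simp only [PySem.List.pySetD_natCast]
      simpa using h1
    · intro i hi
      simp only [PySem.List.pySetD_natCast]
      by_cases hie : i = m
      · subst hie
        rw [List.getD_eq_getElem?_getD, List.getElem?_set_self hmu]
        simp only [Option.getD_some, if_pos (Nat.lt_succ_self _)]
        simp only [cntUp, hv1, hv2]
      · rw [List.getD_eq_getElem?_getD, List.getElem?_set_ne (by omega), ← List.getD_eq_getElem?_getD]
        rw [h2 i hi]
        have : (i < m) ↔ (i < m + 1) := by omega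
        simp only [this]
    · intro x
      rw [PySem.Set.mem_add, h3 x]
      constructor
      · rintro (⟨j, hj, he⟩ | he)
        · exact ⟨j, by omega, he⟩
        · exact ⟨m, by omega, he.symm⟩
      · rintro ⟨j, hj, he⟩
        by_cases hje : j = m
        · right; rw [← he, hje]
        · left; exact ⟨j, by omega, he⟩
    · intro x
      rw [PySem.Set.mem_add, h4 x]
      constructor
      · rintro (⟨j, hj, he⟩ | he)
        · exact ⟨j, by omega, he⟩
        · exact ⟨m, by omega, he.symm⟩
      · rintro ⟨j, hj, he⟩
        by_cases hje : j = m
        · right; rw [← he, hje]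
        · left; exact ⟨j, by omega, he⟩

theorem fwd_inv (l : List Int) (m : Nat) (hm : m ≤ l.length) :
    let st := (List.range m).foldl (fstep l) (List.replicate l.length 0, PySem.Set.empty, PySem.Set.empty)
    st.1.length = l.length
      ∧ (∀ i, i < l.length → st.1.getD i 0 = if i < m then cntUp l i else 0)
      ∧ (∀ x, x ∈ st.2.1 ↔ ∃ j, j < m ∧ dk l j = x)
      ∧ (∀ x, x ∈ st.2.2 ↔ ∃ j, j < m ∧ sk l j = x) := fwd_inv' l m hm

theorem bwd_inv (l up : List Int)
    (hup : ∀ i, i < l.length → up.getD i 0 = cntUp l i) :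
    ∀ m, m ≤ l.length → ∀ (g : Int) (sd ss : PySem.Set Int),
    (∀ x, x ∈ sd ↔ ∃ j, m ≤ j ∧ j < l.length ∧ dk l j = x) →
    (∀ x, x ∈ ss ↔ ∃ j, m ≤ j ∧ j < l.length ∧ sk l j = x) →
    ((List.range m).reverse.foldl (bstep l up) (g, sd, ss)).1
      = (List.range m).reverse.foldl (fun g i => max (cnt l i) g) g := by
  intro m
  induction m with
  | zero => intro _ g sd ss _ _; rfl
  | succ m ih =>
    intro hm g sd ss hsd hss
    simp only [List.range_succ, List.reverse_append, List.reverse_cons, List.reverse_nil,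
      List.nil_append, List.singleton_append, List.foldl_cons]
    have hd : (m : Int) - PySem.List.pyGetD l (m : Int) 0 = dk l m := by
      simp [dk, PySem.List.pyGetD_natCast]
    have hsx : (m : Int) + PySem.List.pyGetD l (m : Int) 0 = sk l m := by
      simp [sk, PySem.List.pyGetD_natCast]
    have hctd : (PySem.Set.contains sd (dk l m) = true) ↔ (∃ j, j < l.length ∧ m < j ∧ dk l j = dk l m) := by
      rw [PySem.Set.contains_iff, hsd]
      constructor
      · rintro ⟨j, hj1, hj2, he⟩; exact ⟨j, hj2, by omega, he⟩
      · rintro ⟨j, hj1, hj2, he⟩; exact ⟨j, by omega, hj1, he⟩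
    have hcts : (PySem.Set.contains ss (sk l m) = true) ↔ (∃ j, j < l.length ∧ m < j ∧ sk l j = sk l m) := by
      rw [PySem.Set.contains_iff, hss]
      constructor
      · rintro ⟨j, hj1, hj2, he⟩; exact ⟨j, hj2, by omega, he⟩
      · rintro ⟨j, hj1, hj2, he⟩; exact ⟨j, by omega, hj1, he⟩
    have hctv : PySem.List.pyGetD up (m : Int) 0
        + (if PySem.Set.contains sd (dk l m) = true then (1 : Int) else 0)
        + (if PySem.Set.contains ss (sk l m) = true then (1 : Int) else 0) = cnt l m := by
      rw [PySem.List.pyGetD_natCast, hup m (by omega)]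
      simp only [hctd, hcts, cnt, cntUp, cntDn]
      ring
    simp only [bstep, hd, hsx, hctv]
    have hmax : (if cnt l m > g then cnt l m else g) = max (cnt l m) g := by
      rw [max_def]; split_ifs <;> omega
    rw [hmax]
    apply ih (by omega)
    · intro x
      rw [PySem.Set.mem_add, hsd x]
      constructor
      · rintro (⟨j, hj1, hj2, he⟩ | he)
        · exact ⟨j, by omega, hj2, he⟩
        · exact ⟨m, le_rfl, by omega, he.symm⟩
      · rintro ⟨j, hj1, hj2, he⟩
        by_cases hje : j = m
        · right; rw [← he, hje]
        · left; exact ⟨j, by omega, hj2, he⟩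
    · intro x
      rw [PySem.Set.mem_add, hss x]
      constructor
      · rintro (⟨j, hj1, hj2, he⟩ | he)
        · exact ⟨j, by omega, hj2, he⟩
        · exact ⟨m, le_rfl, by omega, he.symm⟩
      · rintro ⟨j, hj1, hj2, he⟩
        by_cases hje : j = m
        · right; rw [← he, hje]
        · left; exact ⟨j, by omega, hj2, he⟩

theorem foldl_max_shift (f : Nat → Int) :
    ∀ (l : List Nat) (g c : Int),
      max c (l.foldl (fun g i => max (f i) g) g) = l.foldl (fun g i => max (f i) g) (max c g) := by
  intro l
  induction l with
  | nil => intro g c; rfl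
  | cons x l ih =>
    intro g c
    simp only [List.foldl_cons]
    rw [ih (max (f x) g) c, max_left_comm]

theorem foldl_max_reverse (f : Nat → Int) :
    ∀ (l : List Nat) (g : Int),
      l.reverse.foldl (fun g i => max (f i) g) g = l.foldl (fun g i => max (f i) g) g := by
  intro l
  induction l with
  | nil => intro g; rfl
  | cons x l ih =>
    intro g
    simp only [List.reverse_cons, List.foldl_append, List.foldl_cons, List.foldl_nil]
    rw [ih g, foldl_max_shift]

-- ===== VERDICT (by name: the statement is the Claim_ definition above) =====
theorem maxThreats_spec : Claim_equal_maxThreats := by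
  intro a _
  unfold Spec_maxThreats maxThreats maxThreats_alt
  match a with
  | none => rfl
  | some l =>
    by_cases h1 : l.length ≤ 1
    · simp [h1]
    · simp only [h1, if_false]
      have hfwd := fwd_inv l l.length le_rfl
      obtain ⟨hlen, hupv, _, _⟩ := hfwd
      have hup : ∀ i, i < l.length →
          ((List.range l.length).foldl (fstep l) (List.replicate l.length 0, PySem.Set.empty, PySem.Set.empty)).1.getD i 0
            = cntUp l i := by
        intro i hi; rw [hupv i hi, if_pos hi]
      have hb := bwd_inv l _ hup l.length le_rfl 0 PySem.Set.empty PySem.Set.empty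
        (by intro x; simp [PySem.Set.empty]; omega)
        (by intro x; simp [PySem.Set.empty]; omega)
      rw [maxThreats_eq_ref l, ← foldl_max_reverse (cnt l) (List.range l.length) 0, ← hb]
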